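-- pv_equiv track=rewrite | github.com/angelitto2005/repository.angelitto | all/plugin.video.rotv123/common.py | _pick_now_next
-- ===== SOURCE A (Python) =====
-- def _pick_now_next(shows):
--     active = future = None
--     for sh in shows or []:
--         if sh.get('tense') == 'active' and not active:
--             active = sh
--         elif sh.get('tense') == 'future' and not future:
--             future = sh
--         if active and future:
--             break
--     return active, future
-- ===== SOURCE B (Python) =====
-- def _pick_now_next(shows):
--     lst = shows or []
--     active = next((sh for sh in lst if sh.get('tense') == 'active'), None)
--     future = next((sh for sh in lst if sh.get('tense') == 'future'), None)
--     return active, future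
-- ===== Notes on version B (the rewrite author's own statement) =====
-- stated objective: idiomatic
-- what changed: Replaces the single interleaved early-exit loop with two independent next()-generator scans, one per tense, over 'shows or []'.
import Mathlib
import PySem

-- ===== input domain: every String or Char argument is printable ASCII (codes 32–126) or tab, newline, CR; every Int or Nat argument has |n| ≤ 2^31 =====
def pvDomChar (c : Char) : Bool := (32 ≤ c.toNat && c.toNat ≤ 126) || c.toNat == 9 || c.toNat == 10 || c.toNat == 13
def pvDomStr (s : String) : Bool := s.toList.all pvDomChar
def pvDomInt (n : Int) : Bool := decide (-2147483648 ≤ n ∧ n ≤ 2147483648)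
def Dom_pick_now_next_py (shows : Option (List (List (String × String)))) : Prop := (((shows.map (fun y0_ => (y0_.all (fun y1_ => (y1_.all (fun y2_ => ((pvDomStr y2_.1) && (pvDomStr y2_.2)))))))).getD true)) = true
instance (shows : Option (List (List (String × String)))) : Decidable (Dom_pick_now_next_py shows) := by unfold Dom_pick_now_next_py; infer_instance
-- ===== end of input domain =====

-- B changes the decomposition: one interleaved early-exit loop becomes two independent single-criterion scans (idiomatic, same cost).

-- ===== PORT A =====
-- sh.get('tense'): first-match lookup in the association list (exact for the dict convention)
def pvGetTense (sh : List (String × String)) : Option String :=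
  (sh.find? (fun kv => kv.1 == "tense")).map (fun kv => kv.2)

-- Python truthiness of an Optional[dict]: None and {} are falsy
def pvTruthy (d : Option (List (String × String))) : Bool :=
  match d with
  | none => false
  | some l => !l.isEmpty

-- the loop body of A, with the 'break' rendered as the early return when both are truthy
def pvLoopA : List (List (String × String)) → Option (List (String × String)) →
    Option (List (String × String)) →
    (Option (List (String × String))) × (Option (List (String × String)))
  | [], active, future => (active, future)
  | sh :: rest, active, future =>
    let active' := if pvGetTense sh == some "active" && !pvTruthy active then some sh else active
    let future' := if pvGetTense sh == some "future" && !pvTruthy future then some sh else future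
    if pvTruthy active' && pvTruthy future' then (active', future')
    else pvLoopA rest active' future'

def pick_now_next_py (shows : Option (List (List (String × String)))) : (Option (List (String × String))) × (Option (List (String × String))) :=
  pvLoopA (match shows with | none => [] | some l => l) none none

-- ===== PORT B =====
def pick_now_next_py_alt (shows : Option (List (List (String × String)))) : (Option (List (String × String))) × (Option (List (String × String))) :=
  let lst := match shows with | none => [] | some l => l
  (lst.find? (fun sh => pvGetTense sh == some "active"),
   lst.find? (fun sh => pvGetTense sh == some "future"))

-- ===== PRECONDITION & SPEC =====
def Spec_pick_now_next_py (shows : Option (List (List (String × String)))) (out : (Option (List (String × String))) × (Option (List (String × String)))) : Prop := out = pick_now_next_py_alt shows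
instance (shows : Option (List (List (String × String)))) (out : (Option (List (String × String))) × (Option (List (String × String)))) : Decidable (Spec_pick_now_next_py shows out) := by unfold Spec_pick_now_next_py; infer_instance

-- ===== CLAIM (what is proved, stated in full; the proofs are below) =====
def Claim_equal_pick_now_next_py : Prop := ∀ (shows : Option (List (List (String × String)))), Dom_pick_now_next_py shows → Spec_pick_now_next_py shows (pick_now_next_py shows)

-- ===== LEMMAS AND PROOFS =====

-- any dict that matches a tense is nonempty, hence truthy once assigned
lemma match_nonempty {sh : List (String × String)} {t : String}
    (h : pvGetTense sh == some t) : sh.isEmpty = false := by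
  cases sh with
  | nil => simp [pvGetTense] at h
  | cons a l => rfl

-- invariant: provided each slot is none or a truthy (nonempty) dict, the loop
-- computes exactly the two independent first-match searches
lemma pvLoopA_eq (l : List (List (String × String))) :
    ∀ (a f : Option (List (String × String))),
    (∀ d, a = some d → d.isEmpty = false) → (∀ d, f = some d → d.isEmpty = false) →
    pvLoopA l a f =
      ((match a with
        | none => l.find? (fun sh => pvGetTense sh == some "active")
        | some d => some d),
       (match f with
        | none => l.find? (fun sh => pvGetTense sh == some "future")
        | some d => some d)) := by
  induction l with
  | nil =>
    intro a f _ _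
    cases a <;> cases f <;> simp [pvLoopA]
  | cons sh rest ih =>
    intro a f ha hf
    simp only [pvLoopA]
    have step :
        ∀ (a' f' : Option (List (String × String))),
        (∀ d, a' = some d → d.isEmpty = false) → (∀ d, f' = some d → d.isEmpty = false) →
        (if pvTruthy a' && pvTruthy f' then (a', f') else pvLoopA rest a' f') =
          ((match a' with
            | none => rest.find? (fun sh => pvGetTense sh == some "active")
            | some d => some d),
           (match f' with
            | none => rest.find? (fun sh => pvGetTense sh == some "future")
            | some d => some d)) := by
      intro a' f' ha' hf'
      by_cases hb : (pvTruthy a' && pvTruthy f') = true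
      · rw [if_pos hb]
        cases a' with
        | none => simp [pvTruthy] at hb
        | some da =>
          cases f' with
          | none => simp [pvTruthy] at hb
          | some df => rfl
      · rw [if_neg hb]
        exact ih a' f' ha' hf'
    by_cases hca : (pvGetTense sh == some "active" && !pvTruthy a) = true
    · -- active gets assigned, so a was falsy, i.e. a = none (by the invariant)
      have hanone : a = none := by
        cases a with
        | none => rfl
        | some d =>
          have := ha d rfl
          simp [pvTruthy, this] at hca
      subst hanone
      have hact : (pvGetTense sh == some "active") = true := by
        simpa using (Bool.and_eq_true ..).mp hca |>.1
      rw [if_pos hca]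
      by_cases hcf : (pvGetTense sh == some "future" && !pvTruthy f) = true
      · -- impossible: tense can't equal both strings
        exfalso
        have h2 : (pvGetTense sh == some "future") = true := by
          simpa using (Bool.and_eq_true ..).mp hcf |>.1
        simp only [beq_iff_eq] at hact h2
        rw [hact] at h2
        simp at h2
      · rw [if_neg hcf]
        rw [step (some sh) f (by intro d hd; cases hd; exact match_nonempty hact) hf]
        simp [List.find?, hact]
        cases f with
        | none =>
          have hfut : (pvGetTense sh == some "future") = false := by
            simpa [pvTruthy] using hcf
          simp [hfut]
        | some d => rfl
    · rw [if_neg hca]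
      by_cases hcf : (pvGetTense sh == some "future" && !pvTruthy f) = true
      · have hfnone : f = none := by
          cases f with
          | none => rfl
          | some d =>
            have := hf d rfl
            simp [pvTruthy, this] at hcf
        subst hfnone
        have hfut : (pvGetTense sh == some "future") = true := by
          simpa using (Bool.and_eq_true ..).mp hcf |>.1
        rw [if_pos hcf]
        rw [step a (some sh) ha (by intro d hd; cases hd; exact match_nonempty hfut)]
        simp [List.find?, hfut]
        cases a with
        | none =>
          have hact : (pvGetTense sh == some "active") = false := by
            simpa [pvTruthy] using hca
          simp [hact]
        | some d => rfl
      · rw [if_neg hcf]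
        rw [step a f ha hf]
        cases a with
        | none =>
          cases f with
          | none =>
            have hact : (pvGetTense sh == some "active") = false := by
              simpa [pvTruthy] using hca
            have hfut : (pvGetTense sh == some "future") = false := by
              simpa [pvTruthy] using hcf
            simp [List.find?, hact, hfut]
          | some d => 
            have hact : (pvGetTense sh == some "active") = false := by
              simpa [pvTruthy] using hca
            simp [List.find?, hact]
        | some d =>
          cases f with
          | none =>
            have hfut : (pvGetTense sh == some "future") = false := by
              simpa [pvTruthy] using hcf
            simp [List.find?, hfut]
          | some d' => rfl

-- ===== VERDICT (by name: the statement is the Claim_ definition above) =====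
theorem pick_now_next_py_spec : Claim_equal_pick_now_next_py := by
  intro shows _
  unfold Spec_pick_now_next_py pick_now_next_py pick_now_next_py_alt
  rw [pvLoopA_eq _ none none (by intro d h; cases h) (by intro d h; cases h)]
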